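-- pv_equiv track=rewrite | github.com/malkro7/aoc2025 | aoc6b.py | solve_worksheet
-- ===== SOURCE A (Python) =====
-- def solve_worksheet(lines):
--     # Normalize row length
--     width = max(len(line) for line in lines)
--     grid = [line.ljust(width) for line in lines]
--
--     # Transpose into columns
--     columns = [''.join(grid[r][c] for r in range(len(grid))) for c in range(width)]
--
--     # Split columns into problem blocks
--     problems = []
--     current = []
--
--     for col in columns:
--         if col.strip():
--             current.append(col)
--         else:
--             if current:
--                 problems.append(current)
--                 current = []
--     if current:
--         problems.append(current)
--
--     grand_total = 0
--
--     for block in problems: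
--         # Last row is the operator
--         op_row_index = len(lines) - 1
--         operator = block[0][op_row_index]  # operator is same in all columns
--
--         # Extract numbers column-by-column
--         numbers = []
--
--         # For each column, read digits top→bottom except last row
--         # Then reverse the order: right→left processing
--         for col in reversed(block):  # rightmost column first
--             digits = col[:op_row_index]  # exclude operator row
--             digits = ''.join(d for d in digits if d.isdigit())
--
--             if digits:  # skip empty columns
--                 numbers.append(int(digits))
--
--         # Compute result
--         if operator == '+':
--             result = sum(numbers)
--         elif operator == '*':
--             result = 1
--             for n in numbers:
--                 result *= n
--         else:
--             raise ValueError(f"Unexpected operator: {operator}")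
--
--         grand_total += result
--
--     return grand_total
-- ===== SOURCE B (Python) =====
-- def solve_worksheet(lines):
--     # Single streaming pass over column indices with O(1) state;
--     # no grid normalization, no transposed list, no block list.
--     width = max(len(line) for line in lines)
--     grand_total = 0
--     op = None
--     acc = 0
--     for c in range(width):
--         s = ''.join(line[c] if c < len(line) else ' ' for line in lines)
--         if not s.strip():
--             if op is not None:
--                 grand_total += acc
--                 op = None
--             continue
--         if op is None:
--             op = s[-1]
--             if op == '+':
--                 acc = 0
--             elif op == '*':
--                 acc = 1
--             else:
--                 raise ValueError(f"Unexpected operator: {op}")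
--         digits = ''.join(ch for ch in s[:-1] if ch.isdigit())
--         if digits:
--             n = int(digits)
--             acc = acc + n if op == '+' else acc * n
--     if op is not None:
--         grand_total += acc
--     return grand_total
-- ===== Notes on version B (the rewrite author's own statement) =====
-- stated objective: alternative
-- what changed: A normalizes the grid with ljust, materializes the full transposed column list, splits it into problem blocks and then evaluates each block right-to-left; B makes a single streaming pass over column indices with O(1) state (pending operator and accumulator), folding each column's digits into the accumulator and flushing it at blank columns, never building the grid, the column list or the block list.
import Mathlib
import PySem

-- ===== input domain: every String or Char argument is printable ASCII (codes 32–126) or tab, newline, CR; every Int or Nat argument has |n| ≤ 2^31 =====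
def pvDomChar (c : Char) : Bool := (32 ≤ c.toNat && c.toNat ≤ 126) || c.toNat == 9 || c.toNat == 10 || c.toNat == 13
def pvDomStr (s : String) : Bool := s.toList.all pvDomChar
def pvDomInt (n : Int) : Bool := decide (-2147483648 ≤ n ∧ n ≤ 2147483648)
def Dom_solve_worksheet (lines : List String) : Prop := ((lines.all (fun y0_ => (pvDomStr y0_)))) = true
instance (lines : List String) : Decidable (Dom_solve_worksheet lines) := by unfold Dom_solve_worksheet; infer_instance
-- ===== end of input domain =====

-- B replaces A's grid-normalize / transpose / block-split pipeline by one streaming pass over column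
-- indices with O(1) state (pending operator and accumulator), flushing at blank columns: alternative decomposition.

-- shared helpers (the corresponding Python expressions are identical in A and B)
-- Python: `col.strip()` is falsy
def isBlankCol (col : List Char) : Bool := (PySem.Chars.strip col).isEmpty
-- Python: int(digits); here ds is always a nonempty list of digit chars, so ofChars? never returns none
def pyIntDigits (ds : List Char) : Int := (PySem.Int.ofChars? ds).getD 0
-- Python: max(len(line) for line in lines); raises ValueError on [] (excluded by Pre_), else equals this fold
def maxLen (lines : List String) : Nat := lines.foldl (fun m l => max m l.toList.length) 0

-- ===== PORT A =====
def ljustA (cs : List Char) (w : Nat) : List Char := cs ++ List.replicate (w - cs.length) ' '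
-- ''.join(grid[r][c] for r in range(len(grid))); c is always < row length here, getD is exact
def colOfGrid (grid : List (List Char)) (c : Nat) : List Char := grid.map (fun row => row.getD c ' ')
def splitStep (pc : List (List (List Char)) × List (List Char)) (col : List Char) :
    List (List (List Char)) × List (List Char) :=
  if isBlankCol col = false then (pc.1, pc.2 ++ [col])
  else if pc.2 = [] then pc
  else (pc.1 ++ [pc.2], [])
def buildNums (opIdx : Nat) (block : List (List Char)) : List Int :=
  block.reverse.foldl (fun ns col =>
    if !((col.take opIdx).filter PySem.Chars.isdigit).isEmpty
    then ns ++ [pyIntDigits ((col.take opIdx).filter PySem.Chars.isdigit)] else ns) []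
def blockVal (opIdx : Nat) (block : List (List Char)) : Int :=
  let operator := (block.headD []).getD opIdx ' '
  let numbers := buildNums opIdx block
  if operator = '+' then numbers.foldl (· + ·) 0
  else if operator = '*' then numbers.foldl (· * ·) 1
  else 0   -- Python: raise ValueError — excluded by Pre_
def solve_worksheet (lines : List String) : Int :=
  let width := maxLen lines
  let grid := lines.map (fun l => ljustA l.toList width)
  let columns := (List.range width).map (colOfGrid grid)
  let pc := columns.foldl splitStep ([], [])
  let problems := if pc.2 = [] then pc.1 else pc.1 ++ [pc.2]
  problems.foldl (fun t b => t + blockVal (lines.length - 1) b) 0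

-- ===== PORT B =====
-- ''.join(line[c] if c < len(line) else ' ' for line in lines)
def colB (lines : List String) (c : Nat) : List Char :=
  lines.map (fun l => if c < l.toList.length then l.toList.getD c ' ' else ' ')
def opCharOf (s : List Char) : Char := s.getD (s.length - 1) ' '     -- s[-1]
-- non-'+'/'*': Python raises ValueError — excluded by Pre_
def initAcc (op : Char) : Int := if op = '+' then 0 else if op = '*' then 1 else 0
def digitsB (s : List Char) : List Char := (s.take (s.length - 1)).filter PySem.Chars.isdigit  -- digits of s[:-1]
def updAcc (op : Char) (acc : Int) (ds : List Char) : Int :=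
  if ds.isEmpty then acc else if op = '+' then acc + pyIntDigits ds else acc * pyIntDigits ds
-- one iteration of B's loop body, applied to the already-formed column s
def stepC (st : Int × Option (Char × Int)) (s : List Char) : Int × Option (Char × Int) :=
  if isBlankCol s then
    match st.2 with
    | none => st
    | some (_, acc) => (st.1 + acc, none)
  else
    match st.2 with
    | some (op, acc) => (st.1, some (op, updAcc op acc (digitsB s)))
    | none => let op := opCharOf s; (st.1, some (op, updAcc op (initAcc op) (digitsB s)))
def solve_worksheet_alt (lines : List String) : Int :=
  let r := (List.range (maxLen lines)).foldl (fun st c => stepC st (colB lines c)) (0, none)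
  match r.2 with
  | none => r.1
  | some (_, acc) => r.1 + acc

-- ===== PRECONDITION & SPEC =====
def validOp (s : List Char) : Bool := opCharOf s == '+' || opCharOf s == '*'
def colsOf (lines : List String) : List (List Char) := (List.range (maxLen lines)).map (colB lines)
def headOK (l : List (List Char)) : Bool := match l with | [] => true | c :: _ => isBlankCol c || validOp c
-- Pre_ excludes exactly the inputs where both Pythons raise ValueError: the empty list (max() of an
-- empty sequence) and worksheets where some problem block's operator character (last row of the
-- block's first column) is neither '+' nor '*'.
def Pre_solve_worksheet (lines : List String) : Prop :=
  lines ≠ [] ∧ headOK (colsOf lines) = true ∧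
    List.IsChain (fun a b => (!isBlankCol a || isBlankCol b || validOp b) = true) (colsOf lines)
instance (lines : List String) : Decidable (Pre_solve_worksheet lines) := by
  unfold Pre_solve_worksheet; infer_instance
def pvWitness_solve_worksheet : List String := ["1", "2", "+"]
def Spec_solve_worksheet (lines : List String) (out : Int) : Prop := out = solve_worksheet_alt lines
instance (lines : List String) (out : Int) : Decidable (Spec_solve_worksheet lines out) := by
  unfold Spec_solve_worksheet; infer_instance

-- ===== CLAIM (what is proved, stated in full; the proofs are below) =====
def Claim_equal_solve_worksheet : Prop := ∀ (lines : List String), Dom_solve_worksheet lines → Pre_solve_worksheet lines → Spec_solve_worksheet lines (solve_worksheet lines)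

-- ===== LEMMAS AND PROOFS =====

-- every column produced by A's padded grid equals B's column
lemma ljust_getD (cs : List Char) (w c : Nat) :
    (ljustA cs w).getD c ' ' = if c < cs.length then cs.getD c ' ' else ' ' := by
  unfold ljustA
  by_cases h : c < cs.length
  · rw [List.getD_append cs _ ' ' c h]; simp [h]
  · simp [h, List.getD, List.getElem?_append_right (by omega : cs.length ≤ c)]

lemma colA_eq_colB (lines : List String) (c : Nat) :
    colOfGrid (lines.map (fun l => ljustA l.toList (maxLen lines))) c = colB lines c := by
  unfold colOfGrid colB
  rw [List.map_map]
  exact List.map_congr_left (fun l _ => ljust_getD l.toList (maxLen lines) c)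

-- A's block splitter, recursively
def splitGo : List (List Char) → List (List Char) → List (List (List Char))
  | [], cur => if cur = [] then [] else [cur]
  | col :: cs, cur =>
      if isBlankCol col = false then splitGo cs (cur ++ [col])
      else if cur = [] then splitGo cs [] else cur :: splitGo cs []

lemma splitA_eq (cols : List (List Char)) : ∀ (ps : List (List (List Char))) (cur : List (List Char)),
    (let pc := cols.foldl splitStep (ps, cur);
     if pc.2 = [] then pc.1 else pc.1 ++ [pc.2]) = ps ++ splitGo cols cur := by
  induction cols with
  | nil =>
      intro ps cur
      by_cases h : cur = [] <;> simp [splitGo, h]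
  | cons c cs ih =>
      intro ps cur
      simp only [List.foldl_cons, splitGo, splitStep]
      by_cases hb : isBlankCol c = false
      · simpa [hb] using ih ps (cur ++ [c])
      · by_cases hc : cur = []
        · simpa [hb, hc] using ih ps []
        · simpa [hb, hc, List.append_assoc] using ih (ps ++ [cur]) []

-- validity of run-start operators, threaded through the scan (pb = previous column blank / at start)
def goodR : Bool → List (List Char) → Prop
  | _, [] => True
  | pb, c :: cs => ((pb = true ∧ isBlankCol c = false) → validOp c = true) ∧ goodR (isBlankCol c) cs

lemma pre_goodR (cols : List (List Char)) : ∀ pb : Bool,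
    (pb = true → headOK cols = true) →
    List.IsChain (fun a b => (!isBlankCol a || isBlankCol b || validOp b) = true) cols →
    goodR pb cols := by
  induction cols with
  | nil => intro pb _ _; trivial
  | cons c cs ih =>
      intro pb hhead hchain
      rw [List.isChain_cons] at hchain
      refine ⟨?_, ?_⟩
      · rintro ⟨hpb, hnb⟩
        have := hhead hpb
        simpa [headOK, hnb] using this
      · refine ih (isBlankCol c) ?_ hchain.2
        intro hbc
        cases cs with
        | nil => rfl
        | cons d ds =>
            have := hchain.1 d rfl
            simpa [headOK, hbc] using this

-- B's accumulator over a block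
def accOf (op : Char) (block : List (List Char)) : Int :=
  block.foldl (fun a col => updAcc op a (digitsB col)) (initAcc op)

-- per-column contributions of A's numbers list
def gPlus (opIdx : Nat) (col : List Char) : Int :=
  if ((col.take opIdx).filter PySem.Chars.isdigit).isEmpty then 0
  else pyIntDigits ((col.take opIdx).filter PySem.Chars.isdigit)
def gStar (opIdx : Nat) (col : List Char) : Int :=
  if ((col.take opIdx).filter PySem.Chars.isdigit).isEmpty then 1
  else pyIntDigits ((col.take opIdx).filter PySem.Chars.isdigit)

lemma buildNums_eq (opIdx : Nat) (block : List (List Char)) :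
    buildNums opIdx block =
      ((block.reverse.filter (fun col => !((col.take opIdx).filter PySem.Chars.isdigit).isEmpty)).map
        (fun col => pyIntDigits ((col.take opIdx).filter PySem.Chars.isdigit))) := by
  unfold buildNums
  rw [PySem.List.foldl_append_if]
  simp

lemma sum_filter_map_eq_map_gPlus (opIdx : Nat) (l : List (List Char)) :
    ((l.filter (fun col => !((col.take opIdx).filter PySem.Chars.isdigit).isEmpty)).map
      (fun col => pyIntDigits ((col.take opIdx).filter PySem.Chars.isdigit))).sum =
      (l.map (gPlus opIdx)).sum := by
  induction l with
  | nil => rfl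
  | cons c cs ih =>
      by_cases h : ((c.take opIdx).filter PySem.Chars.isdigit).isEmpty
      · simp [h, gPlus, ih]
      · simp [h, gPlus, ih]

lemma prod_filter_map_eq_map_gStar (opIdx : Nat) (l : List (List Char)) :
    ((l.filter (fun col => !((col.take opIdx).filter PySem.Chars.isdigit).isEmpty)).map
      (fun col => pyIntDigits ((col.take opIdx).filter PySem.Chars.isdigit))).prod =
      (l.map (gStar opIdx)).prod := by
  induction l with
  | nil => rfl
  | cons c cs ih =>
      by_cases h : ((c.take opIdx).filter PySem.Chars.isdigit).isEmpty
      · simp [h, gStar, ih]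
      · simp [h, gStar, ih]

lemma updAcc_plus (a : Int) (ds : List Char) :
    updAcc '+' a ds = a + (if ds.isEmpty then 0 else pyIntDigits ds) := by
  unfold updAcc
  by_cases h : ds.isEmpty <;> simp [h]

lemma updAcc_star (a : Int) (ds : List Char) :
    updAcc '*' a ds = a * (if ds.isEmpty then 1 else pyIntDigits ds) := by
  unfold updAcc
  by_cases h : ds.isEmpty <;> simp [h]

lemma gPlus_eq_digitsB (c : List Char) :
    gPlus (c.length - 1) c = (if (digitsB c).isEmpty then 0 else pyIntDigits (digitsB c)) := rfl

lemma gStar_eq_digitsB (c : List Char) :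
    gStar (c.length - 1) c = (if (digitsB c).isEmpty then 1 else pyIntDigits (digitsB c)) := rfl

lemma acc_plus (block : List (List Char)) : ∀ a : Int,
    block.foldl (fun a col => updAcc '+' a (digitsB col)) a =
      a + (block.map (fun col => gPlus (col.length - 1) col)).sum := by
  induction block with
  | nil => intro a; simp
  | cons c cs ih =>
      intro a
      rw [List.foldl_cons, updAcc_plus, ih, List.map_cons, List.sum_cons, gPlus_eq_digitsB]
      ring

lemma acc_star (block : List (List Char)) : ∀ a : Int,
    block.foldl (fun a col => updAcc '*' a (digitsB col)) a =
      a * (block.map (fun col => gStar (col.length - 1) col)).prod := by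
  induction block with
  | nil => intro a; simp
  | cons c cs ih =>
      intro a
      rw [List.foldl_cons, updAcc_star, ih, List.map_cons, List.prod_cons, gStar_eq_digitsB]
      ring

lemma key_block (n : Nat) (block : List (List Char))
    (hlen : ∀ col ∈ block, col.length = n) (hne : block ≠ [])
    (hval : validOp (block.headD []) = true) :
    blockVal (n - 1) block = accOf (opCharOf (block.headD [])) block := by
  obtain ⟨h, r, rfl⟩ : ∃ h r, block = h :: r := by
    cases block with | nil => exact absurd rfl hne | cons h r => exact ⟨h, r, rfl⟩
  have hh : h.length = n := hlen h (by simp)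
  have hop : ((h :: r).headD []).getD (n - 1) ' ' = opCharOf h := by
    simp [opCharOf, hh]
  have hvor : opCharOf h = '+' ∨ opCharOf h = '*' := by
    simpa [validOp] using hval
  unfold blockVal accOf
  rw [buildNums_eq]
  simp only [List.headD_cons] at hop ⊢
  rcases hvor with hv | hv
  · simp only [hop, hv]
    rw [show ∀ ns : List Int, ∀ a : Int, ns.foldl (· + ·) a = a + ns.sum by
          intro ns a; rw [List.sum_eq_foldl]; induction ns generalizing a with
          | nil => simp
          | cons x xs ih => simp only [List.foldl_cons]; rw [ih, ih (0 + x)]; ring]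
    rw [List.filter_reverse, List.map_reverse, List.sum_reverse,
        sum_filter_map_eq_map_gPlus]
    have hacc := acc_plus (h :: r) (initAcc '+')
    rw [List.map_congr_left (fun col hc => by rw [hlen col hc])] at hacc
    rw [hacc]
    simp [initAcc]
  · simp only [hop, hv, if_neg (by decide : ¬('*' : Char) = '+')]
    rw [show ∀ ns : List Int, ∀ a : Int, ns.foldl (· * ·) a = a * ns.prod by
          intro ns a; rw [List.prod_eq_foldl]; induction ns generalizing a with
          | nil => simp
          | cons x xs ih => simp only [List.foldl_cons]; rw [ih, ih (1 * x)]; ring]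
    rw [List.filter_reverse, List.map_reverse, List.prod_reverse,
        prod_filter_map_eq_map_gStar]
    have hacc := acc_star (h :: r) (initAcc '*')
    rw [List.map_congr_left (fun col hc => by rw [hlen col hc])] at hacc
    rw [hacc]
    simp [initAcc]

-- B's loop state corresponding to a partially read block
def stOf (cur : List (List Char)) : Option (Char × Int) :=
  match cur with
  | [] => none
  | h :: _ => some (opCharOf h, accOf (opCharOf h) cur)

def finishB (r : Int × Option (Char × Int)) : Int :=
  match r.2 with
  | none => r.1
  | some (_, acc) => r.1 + acc

lemma main_inv (n : Nat) (cols : List (List Char)) : ∀ (cur : List (List Char)) (t : Int),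
    (∀ col ∈ cols, col.length = n) → (∀ col ∈ cur, col.length = n) →
    goodR cur.isEmpty cols →
    (cur ≠ [] → validOp (cur.headD []) = true) →
    finishB (cols.foldl stepC (t, stOf cur)) =
      t + ((splitGo cols cur).map (blockVal (n - 1))).sum := by
  induction cols with
  | nil =>
      intro cur t _ hcur _ hval
      cases cur with
      | nil => simp [splitGo, finishB, stOf]
      | cons h r =>
          have hk := key_block n (h :: r) hcur (by simp) (hval (by simp))
          simp only [List.foldl_nil, splitGo, finishB, stOf, List.headD_cons] at hk ⊢
          simp [hk]
  | cons c cs ih =>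
      intro cur t hlen hcur hgood hval
      have hlc : c.length = n := hlen c (by simp)
      have hlens : ∀ col ∈ cs, col.length = n := fun col hc => hlen col (by simp [hc])
      by_cases hb : isBlankCol c = true
      · -- blank column: flush the pending block
        cases cur with
        | nil =>
            simp only [List.isEmpty_nil] at hgood
            have h2 := ih [] t hlens (by simp) (by simpa [hb] using hgood.2) (by simp)
            simp only [stOf] at h2
            simp only [List.foldl_cons, stepC, stOf, hb, if_true, splitGo]
            rw [if_neg (by simp)]
            exact h2
        | cons h r =>
            have hk := key_block n (h :: r) hcur (by simp) (hval (by simp))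
            simp only [List.isEmpty_cons] at hgood
            have h2 := ih [] (t + accOf (opCharOf h) (h :: r)) hlens (by simp)
              (by simpa [hb] using hgood.2) (by simp)
            simp only [stOf] at h2
            simp only [List.foldl_cons, stepC, stOf, hb, if_true, splitGo,
              List.headD_cons] at hk ⊢
            rw [if_neg (by simp)]
            rw [h2, if_neg (List.cons_ne_nil h r), List.map_cons, List.sum_cons, hk]
            ring
      · -- non-blank column: start or extend the block
        have hb' : isBlankCol c = false := by simpa using hb
        cases cur with
        | nil =>
            simp only [List.isEmpty_nil] at hgood
            have hvc : validOp c = true := hgood.1 ⟨rfl, hb'⟩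
            have h2 := ih [c] t hlens (by simpa using hlc)
              (by simpa [hb'] using hgood.2) (fun _ => by simpa using hvc)
            simp only [stOf, accOf, List.foldl_cons, List.foldl_nil] at h2
            simp only [List.foldl_cons, stepC, stOf, hb', splitGo]
            simpa using h2
        | cons h r =>
            simp only [List.isEmpty_cons] at hgood
            have hcur' : ∀ col ∈ (h :: r) ++ [c], col.length = n := by
              intro col hc
              rcases List.mem_append.mp hc with h1 | h1
              · exact hcur col h1
              · simp at h1; subst h1; exact hlc
            have h2 := ih ((h :: r) ++ [c]) t hlens hcur'
              (by simpa [hb'] using hgood.2) (fun _ => hval (by simp))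
            rw [show stOf ((h :: r) ++ [c]) =
                  some (opCharOf h, updAcc (opCharOf h) (accOf (opCharOf h) (h :: r)) (digitsB c)) by
                simp [stOf, accOf, List.foldl_append]] at h2
            simp only [List.foldl_cons, stepC, stOf, hb', splitGo]
            simpa using h2

-- foldl-accumulate of block values is a sum over the mapped list
lemma foldl_blockVal (opIdx : Nat) (l : List (List (List Char))) (t : Int) :
    l.foldl (fun t b => t + blockVal opIdx b) t = t + (l.map (blockVal opIdx)).sum :=
  PySem.List.foldl_add l (blockVal opIdx) t

-- ===== VERDICT (by name: the statement is the Claim_ definition above) =====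
theorem solve_worksheet_spec : Claim_equal_solve_worksheet := by
  intro lines _ hpre
  obtain ⟨-, hhead, hchain⟩ := hpre
  show solve_worksheet lines = solve_worksheet_alt lines
  have hcols : (List.range (maxLen lines)).map
      (colOfGrid (lines.map (fun l => ljustA l.toList (maxLen lines)))) = colsOf lines :=
    List.map_congr_left (fun c _ => colA_eq_colB lines c)
  have hlen : ∀ col ∈ colsOf lines, col.length = lines.length := by
    intro col hc
    obtain ⟨c, -, rfl⟩ := List.mem_map.mp hc
    simp [colB]
  -- A's side
  have hA : solve_worksheet lines =
      ((splitGo (colsOf lines) []).map (blockVal (lines.length - 1))).sum := by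
    unfold solve_worksheet
    simp only []
    rw [hcols, foldl_blockVal]
    have := splitA_eq (colsOf lines) [] []
    simp only [] at this
    rw [show (if ((colsOf lines).foldl splitStep ([], [])).2 = []
          then ((colsOf lines).foldl splitStep ([], [])).1
          else ((colsOf lines).foldl splitStep ([], [])).1 ++
            [((colsOf lines).foldl splitStep ([], [])).2]) = [] ++ splitGo (colsOf lines) [] from this]
    simp
  -- B's side
  have hB : solve_worksheet_alt lines =
      finishB ((colsOf lines).foldl stepC (0, none)) := by
    unfold solve_worksheet_alt colsOf finishB
    rw [List.foldl_map]
  rw [hA, hB]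
  have := main_inv lines.length (colsOf lines) [] 0 hlen (by simp)
    (pre_goodR (colsOf lines) true (fun _ => hhead) hchain) (by simp)
  simp only [stOf] at this
  rw [this]
  simp
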